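-- pv_equiv track=rewrite | github.com/yqliukev/resume-generator | parser.py | zone_extract
-- ===== SOURCE A (Python) =====
-- def zone_extract(lines: list[str]) -> tuple[str, str, list[str], str]:
--     """
--     Split lines into (preamble, header, body_lines, trailing).
--     preamble: everything before \\begin{center}
--     header:   \\begin{center} ... \\end{center} (inclusive)
--     body_lines: list of lines after \\end{center} until \\end{document}
--     trailing: \\end{document} and anything after
--     """
--     PREAMBLE, HEADER, BODY, TRAILING = range(4)
--     state = PREAMBLE
--
--     preamble_lines = []
--     header_lines = []
--     body_lines = []
--     trailing_lines = []
--
--     for line in lines: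
--         if state == PREAMBLE:
--             if r'\begin{center}' in line:
--                 state = HEADER
--                 header_lines.append(line)
--             else:
--                 preamble_lines.append(line)
--         elif state == HEADER:
--             header_lines.append(line)
--             if r'\end{center}' in line:
--                 state = BODY
--         elif state == BODY:
--             if r'\end{document}' in line:
--                 state = TRAILING
--                 trailing_lines.append(line)
--             else:
--                 body_lines.append(line)
--         else:  # TRAILING
--             trailing_lines.append(line)
--
--     return (
--         ''.join(preamble_lines),
--         ''.join(header_lines),
--         body_lines,
--         ''.join(trailing_lines),
--     )
-- ===== SOURCE B (Python) =====
-- def zone_extract(lines: list[str]) -> tuple[str, str, list[str], str]: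
--     """Split lines into (preamble, header, body_lines, trailing) by slicing at
--     the three marker lines instead of running a state machine."""
--     BEGIN, ENDC, ENDD = r'\begin{center}', r'\end{center}', r'\end{document}'
--
--     def split_at(mark, xs):
--         """(prefix before first line containing mark, that line and the rest)."""
--         for p, x in enumerate(xs):
--             if mark in x:
--                 return xs[:p], xs[p:]
--         return xs, []
--
--     pre, rest = split_at(BEGIN, lines)
--     if not rest:
--         return (''.join(lines), '', [], '')
--     mid, rest2 = split_at(ENDC, rest[1:])
--     header = [rest[0]] + mid + rest2[:1]
--     body, tail = split_at(ENDD, rest2[1:])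
--     return (''.join(pre), ''.join(header), body, ''.join(tail))
-- ===== Notes on version B (the rewrite author's own statement) =====
-- stated objective: simpler
-- what changed: Replaced the four-state machine that dispatches every line through state branches with three successive split-at-marker slices (split at \begin{center}, then at \end{center}, then at \end{document}) whose pieces are glued into the four zones directly.
import Mathlib
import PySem

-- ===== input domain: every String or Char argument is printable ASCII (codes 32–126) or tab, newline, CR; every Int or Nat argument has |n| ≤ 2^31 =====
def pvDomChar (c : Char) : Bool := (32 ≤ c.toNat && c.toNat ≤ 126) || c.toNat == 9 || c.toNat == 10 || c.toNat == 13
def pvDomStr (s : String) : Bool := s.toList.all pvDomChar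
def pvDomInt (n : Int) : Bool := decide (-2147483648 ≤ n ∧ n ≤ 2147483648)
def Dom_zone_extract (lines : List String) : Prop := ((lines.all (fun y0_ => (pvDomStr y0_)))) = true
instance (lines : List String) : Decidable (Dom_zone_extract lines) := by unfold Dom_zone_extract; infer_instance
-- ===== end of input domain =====

-- B replaces A's four-state machine by three split-at-marker slices (objective: simpler decomposition, same cost).

-- ===== PORT A =====
-- one step of A's for-loop: state 0=PREAMBLE 1=HEADER 2=BODY 3=TRAILING, four accumulators
def zoneStep (acc : Nat × List String × List String × List String × List String)
    (line : String) : Nat × List String × List String × List String × List String :=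
  match acc with
  | (0, p, h, b, t) =>
    if PySem.Str.isIn "\\begin{center}" line then (1, p, h ++ [line], b, t)
    else (0, p ++ [line], h, b, t)
  | (1, p, h, b, t) =>
    if PySem.Str.isIn "\\end{center}" line then (2, p, h ++ [line], b, t)
    else (1, p, h ++ [line], b, t)
  | (2, p, h, b, t) =>
    if PySem.Str.isIn "\\end{document}" line then (3, p, h, b, t ++ [line])
    else (2, p, h, b ++ [line], t)
  | (_, p, h, b, t) => (3, p, h, b, t ++ [line])

def zone_extract (lines : List String) : String × String × List String × String :=
  let (_, p, h, b, t) := lines.foldl zoneStep (0, [], [], [], [])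
  (PySem.Str.join "" p, PySem.Str.join "" h, b, PySem.Str.join "" t)

-- ===== PORT B =====
-- Source B's split_at: prefix before first line containing mark, that line and the rest
def splitAtMark (mark : String) : List String → List String × List String
  | [] => ([], [])
  | x :: xs =>
    if PySem.Str.isIn mark x then ([], x :: xs)
    else
      let (a, b) := splitAtMark mark xs
      (x :: a, b)

def zone_extract_alt (lines : List String) : String × String × List String × String :=
  let (pre, rest) := splitAtMark "\\begin{center}" lines
  match rest with
  | [] => (PySem.Str.join "" lines, "", [], "")
  | r0 :: rtl =>
    let (mid, rest2) := splitAtMark "\\end{center}" rtl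
    let header := r0 :: (mid ++ rest2.take 1)
    let (body, tail) := splitAtMark "\\end{document}" (rest2.drop 1)
    (PySem.Str.join "" pre, PySem.Str.join "" header, body, PySem.Str.join "" tail)

-- ===== PRECONDITION & SPEC =====
def Spec_zone_extract (lines : List String) (out : String × String × List String × String) : Prop := out = zone_extract_alt lines
instance (lines : List String) (out : String × String × List String × String) : Decidable (Spec_zone_extract lines out) := by unfold Spec_zone_extract; infer_instance

-- ===== CLAIM (what is proved, stated in full; the proofs are below) =====
def Claim_equal_zone_extract : Prop := ∀ (lines : List String), Dom_zone_extract lines → Spec_zone_extract lines (zone_extract lines)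

-- ===== LEMMAS AND PROOFS =====

theorem splitAtMark_join (mark : String) (ls : List String) :
    (splitAtMark mark ls).1 ++ (splitAtMark mark ls).2 = ls := by
  induction ls with
  | nil => simp [splitAtMark]
  | cons x xs ih =>
    simp only [splitAtMark]
    split_ifs with h
    · rfl
    · simpa using ih

-- state 3: everything goes to trailing
theorem fold3 (ls : List String) (p h b t : List String) :
    ls.foldl zoneStep (3, p, h, b, t) = (3, p, h, b, t ++ ls) := by
  induction ls generalizing t with
  | nil => simp
  | cons x xs ih => simp [zoneStep, ih, List.append_assoc]

-- state 2: body until \end{document}, then trailing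
theorem fold2 (ls : List String) (p h b t : List String) :
    ls.foldl zoneStep (2, p, h, b, t) =
      (let (bo, ta) := splitAtMark "\\end{document}" ls
       ((if ta = [] then 2 else 3 : Nat), p, h, b ++ bo, t ++ ta)) := by
  induction ls generalizing b with
  | nil => simp [splitAtMark]
  | cons x xs ih =>
    by_cases hx : PySem.Str.isIn "\\end{document}" x = true
    · simp only [List.foldl_cons, zoneStep, splitAtMark, hx, if_true]
      simp [fold3, List.append_assoc]
    · simp only [List.foldl_cons, zoneStep, splitAtMark, hx, Bool.false_eq_true, if_false]
      rw [ih]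
      cases hs : splitAtMark "\\end{document}" xs with
      | mk bo ta => simp [List.append_assoc]

-- state 1: header until \end{center} inclusive, then state 2
theorem fold1 (ls : List String) (p h b t : List String) :
    ls.foldl zoneStep (1, p, h, b, t) =
      (match splitAtMark "\\end{center}" ls with
       | (mid, []) => (1, p, h ++ mid, b, t)
       | (mid, e :: after) =>
         let (bo, ta) := splitAtMark "\\end{document}" after
         ((if ta = [] then 2 else 3 : Nat), p, h ++ mid ++ [e], b ++ bo, t ++ ta)) := by
  induction ls generalizing h with
  | nil => simp [splitAtMark]
  | cons x xs ih =>
    by_cases hx : PySem.Str.isIn "\\end{center}" x = true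
    · simp only [List.foldl_cons, zoneStep, splitAtMark, hx, if_true, fold2]
      cases hs : splitAtMark "\\end{document}" xs with
      | mk bo ta => simp
    · simp only [List.foldl_cons, zoneStep, splitAtMark, hx, Bool.false_eq_true, if_false]
      rw [ih]
      cases hs : splitAtMark "\\end{center}" xs with
      | mk mid rest2 =>
        cases rest2 with
        | nil => simp [List.append_assoc]
        | cons e after =>
          cases hd : splitAtMark "\\end{document}" after with
          | mk bo ta => simp [List.append_assoc]

-- state 0: preamble until \begin{center}, then state 1
theorem fold0 (ls : List String) (p h b t : List String) :
    ls.foldl zoneStep (0, p, h, b, t) =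
      (match splitAtMark "\\begin{center}" ls with
       | (pre, []) => (0, p ++ pre, h, b, t)
       | (pre, r0 :: rtl) =>
         match splitAtMark "\\end{center}" rtl with
         | (mid, []) => (1, p ++ pre, h ++ r0 :: mid, b, t)
         | (mid, e :: after) =>
           let (bo, ta) := splitAtMark "\\end{document}" after
           ((if ta = [] then 2 else 3 : Nat), p ++ pre, h ++ r0 :: mid ++ [e], b ++ bo, t ++ ta)) := by
  induction ls generalizing p with
  | nil => simp [splitAtMark]
  | cons x xs ih =>
    by_cases hx : PySem.Str.isIn "\\begin{center}" x = true
    · simp only [List.foldl_cons, zoneStep, splitAtMark, hx, if_true, fold1]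
      cases hs : splitAtMark "\\end{center}" xs with
      | mk mid rest2 =>
        cases rest2 with
        | nil => simp
        | cons e after =>
          cases hd : splitAtMark "\\end{document}" after with
          | mk bo ta => simp
    · simp only [List.foldl_cons, zoneStep, splitAtMark, hx, Bool.false_eq_true, if_false]
      rw [ih]
      cases hs : splitAtMark "\\begin{center}" xs with
      | mk pre rest =>
        cases rest with
        | nil => simp [List.append_assoc]
        | cons r0 rtl =>
          cases hc : splitAtMark "\\end{center}" rtl with
          | mk mid rest2 =>
            cases rest2 with
            | nil => simp [List.append_assoc]
            | cons e after =>
              cases hd : splitAtMark "\\end{document}" after with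
              | mk bo ta => simp [List.append_assoc]

-- ===== VERDICT (by name: the statement is the Claim_ definition above) =====
theorem zone_extract_spec : Claim_equal_zone_extract := by
  intro lines _
  unfold Spec_zone_extract zone_extract zone_extract_alt
  rw [fold0]
  cases hs : splitAtMark "\\begin{center}" lines with
  | mk pre rest =>
    cases rest with
    | nil =>
      have hj := splitAtMark_join "\\begin{center}" lines
      rw [hs] at hj; simp at hj
      simp [hj, PySem.Str.join]
    | cons r0 rtl =>
      cases hc : splitAtMark "\\end{center}" rtl with
      | mk mid rest2 =>
        cases rest2 with
        | nil => simp [hc, splitAtMark]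
        | cons e after =>
          cases hd : splitAtMark "\\end{document}" after with
          | mk bo ta => simp [hc, hd]
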